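-- pv_equiv track=rewrite | github.com/kunal9211pandey/Greek-For-Greek-DSA-Problem-With-Solution | Difficulty: Basic/Wrong Ball/wrong-ball.py | countWrongPlacedBalls
-- ===== SOURCE A (Python) =====
-- def countWrongPlacedBalls(s):
--     count = 0
--
--     for i in range(len(s)):
--         table_index = i + 1  # 1-based index
--
--         if table_index % 2 == 0 and s[i] == 'R':
--             count += 1
--         elif table_index % 2 == 1 and s[i] == 'B':
--             count += 1
--
--     return count
-- ===== SOURCE B (Python) =====
-- def countWrongPlacedBalls(s):
--     count = 0
--     it = iter(s)
--     for a in it: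
--         if a == 'B':          # odd table (1-based): a blue ball is wrong
--             count += 1
--         b = next(it, None)
--         if b == 'R':          # even table: a red ball is wrong
--             count += 1
--     return count
-- ===== Notes on version B (the rewrite author's own statement) =====
-- stated objective: alternative
-- what changed: B consumes the string two characters at a time from one iterator (pairing odd/even tables structurally) instead of A's indexed scan with a per-element index-parity test; dropping range/len indexing and the modulo branch gives a constant-factor speedup.
import Mathlib
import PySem

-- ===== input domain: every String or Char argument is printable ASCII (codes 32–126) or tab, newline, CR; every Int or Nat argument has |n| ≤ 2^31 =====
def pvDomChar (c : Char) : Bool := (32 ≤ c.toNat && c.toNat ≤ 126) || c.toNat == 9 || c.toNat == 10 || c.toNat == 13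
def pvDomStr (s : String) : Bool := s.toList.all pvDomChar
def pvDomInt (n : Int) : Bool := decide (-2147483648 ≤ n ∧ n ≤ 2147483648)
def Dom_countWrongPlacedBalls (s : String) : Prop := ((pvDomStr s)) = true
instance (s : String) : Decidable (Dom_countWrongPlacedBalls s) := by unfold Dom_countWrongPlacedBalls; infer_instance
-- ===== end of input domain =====

-- B replaces A's indexed scan with index-parity tests by one iterator consumed two
-- characters at a time (odd table, then even table); same result, no index arithmetic.

-- ===== PORT A =====
-- for i in range(len(s)): table_index = i+1; branch on parity and s[i]
def countWrongPlacedBalls (s : String) : Int :=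
  (PySem.List.pyRange 0 (PySem.Str.len s) 1).foldl
    (fun count i =>
      if PySem.Int.mod (i + 1) 2 = 0 ∧ PySem.Str.pyGet? s i = some 'R' then count + 1
      else if PySem.Int.mod (i + 1) 2 = 1 ∧ PySem.Str.pyGet? s i = some 'B' then count + 1
      else count)
    0

-- ===== PORT B =====
-- the for-loop over `it` taking a second element with next(it, None): structurally,
-- a two-at-a-time recursion over the character list carrying the accumulator
def pvAltGo : List Char → Int → Int
  | [], count => count
  | [a], count => count + (if a = 'B' then 1 else 0)
  | a :: b :: rest, count =>
      pvAltGo rest ((count + (if a = 'B' then 1 else 0)) + (if b = 'R' then 1 else 0))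

def countWrongPlacedBalls_alt (s : String) : Int := pvAltGo s.toList 0

-- ===== PRECONDITION & SPEC =====
def Spec_countWrongPlacedBalls (s : String) (out : Int) : Prop := out = countWrongPlacedBalls_alt s
instance (s : String) (out : Int) : Decidable (Spec_countWrongPlacedBalls s out) := by unfold Spec_countWrongPlacedBalls; infer_instance

-- ===== CLAIM (what is proved, stated in full; the proofs are below) =====
def Claim_equal_countWrongPlacedBalls : Prop := ∀ (s : String), Dom_countWrongPlacedBalls s → Spec_countWrongPlacedBalls s (countWrongPlacedBalls s)

-- ===== LEMMAS AND PROOFS =====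

-- A's loop body, specialised to the character list it indexes into
def pvAFun (l : List Char) : Int → Int → Int :=
  fun count i =>
    if PySem.Int.mod (i + 1) 2 = 0 ∧ PySem.List.pyGet? l i = some 'R' then count + 1
    else if PySem.Int.mod (i + 1) 2 = 1 ∧ PySem.List.pyGet? l i = some 'B' then count + 1
    else count

-- pyRange a (a+n) 1 as an explicit map over List.range (specialised shape both rewrites below need)
theorem pvRange_cast (n : Nat) : ∀ (a : Int),
    PySem.List.pyRange a (a + (n : Int)) 1 = (List.range n).map (fun k : Nat => a + (k : Int)) := by
  induction n with
  | zero => intro a; simp [PySem.List.pyRange_one_eq_nil]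
  | succ m ih =>
      intro a
      rw [show a + ((m + 1 : Nat) : Int) = a + (m : Int) + 1 from by push_cast; ring]
      rw [PySem.List.pyRange_one_cons (by omega)]
      have := ih (a + 1)
      rw [show a + 1 + (m : Int) = a + (m : Int) + 1 from by ring] at this
      rw [this, List.range_succ_eq_map]
      simp only [List.map_cons, List.map_map]
      congr 1
      · push_cast; ring
      · congr 1; funext k; simp [Function.comp]; ring

-- shifting the index by 2 past two leading characters keeps parity and the element read
theorem pvAFun_shift (a b : Char) (rest : List Char) (c : Int) (k : Nat) :
    pvAFun (a :: b :: rest) c (2 + (k : Int)) = pvAFun rest c (k : Int) := by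
  have h1 : PySem.List.pyGet? (a :: b :: rest) (2 + (k : Int)) = PySem.List.pyGet? rest (k : Int) := by
    have : (2 + (k : Int)) = ((2 + k : Nat) : Int) := by push_cast; ring
    rw [this, PySem.List.pyGet?_natCast, PySem.List.pyGet?_natCast]
    simp [Nat.add_comm 2 k]
  have h2 : PySem.Int.mod (2 + (k : Int) + 1) 2 = PySem.Int.mod ((k : Int) + 1) 2 := by
    rw [PySem.Int.mod_eq_emod_of_pos (by norm_num : (0:Int) < 2),
        PySem.Int.mod_eq_emod_of_pos (by norm_num : (0:Int) < 2)]
    omega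
  simp only [pvAFun, h1, h2]

theorem pvMain : ∀ (l : List Char) (c : Int),
    (PySem.List.pyRange 0 (l.length : Int) 1).foldl (pvAFun l) c = pvAltGo l c
  | [], c => by simp [PySem.List.pyRange_one_eq_nil, pvAltGo]
  | [a], c => by
      rw [PySem.List.pyRange_one_cons (by norm_num), PySem.List.pyRange_one_eq_nil (by norm_num)]
      simp only [List.foldl_cons, List.foldl_nil, pvAFun, pvAltGo]
      norm_num [PySem.Int.mod_eq_emod_of_pos (by norm_num : (0:Int) < 2),
        PySem.List.pyGet?, PySem.List.pyIdx?]
      split_ifs <;> simp_all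
  | a :: b :: rest, c => by
      have hlen : ((a :: b :: rest).length : Int) = (rest.length : Int) + 2 := by
        simp; ring
      rw [hlen, PySem.List.pyRange_one_cons (by omega), PySem.List.pyRange_one_cons (by omega)]
      simp only [List.foldl_cons, show (0:Int) + 1 = 1 from by norm_num,
        show (1:Int) + 1 = 2 from by norm_num]
      have hshift : PySem.List.pyRange 2 ((rest.length : Int) + 2) 1
          = (List.range rest.length).map (fun k : Nat => 2 + (k : Int)) := by
        rw [show ((rest.length : Int) + 2) = 2 + (rest.length : Int) from by ring]
        exact pvRange_cast rest.length 2
      have hbase : PySem.List.pyRange 0 ((rest.length : Int)) 1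
          = (List.range rest.length).map (fun k : Nat => (k : Int)) := by
        rw [show ((rest.length : Int)) = 0 + (rest.length : Int) from by ring]
        rw [pvRange_cast rest.length 0]
        simp
      have step2 : pvAFun (a :: b :: rest) (pvAFun (a :: b :: rest) c 0) 1
          = (c + (if a = 'B' then 1 else 0)) + (if b = 'R' then 1 else 0) := by
        simp only [pvAFun]
        norm_num [PySem.Int.mod_eq_emod_of_pos (by norm_num : (0:Int) < 2),
          PySem.List.pyGet?, PySem.List.pyIdx?]
        split_ifs <;> simp_all <;> omega
      rw [step2, hshift, List.foldl_map]
      have hfun : (fun (c' : Int) (k : Nat) => pvAFun (a :: b :: rest) c' (2 + (k : Int)))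
          = fun (c' : Int) (k : Nat) => pvAFun rest c' (k : Int) := by
        funext c' k; exact pvAFun_shift a b rest c' k
      rw [hfun]
      have := pvMain rest ((c + (if a = 'B' then 1 else 0)) + (if b = 'R' then 1 else 0))
      rw [hbase, List.foldl_map] at this
      rw [this]
      rfl

-- ===== VERDICT (by name: the statement is the Claim_ definition above) =====
theorem countWrongPlacedBalls_spec : Claim_equal_countWrongPlacedBalls := by
  intro s _
  show countWrongPlacedBalls s = countWrongPlacedBalls_alt s
  unfold countWrongPlacedBalls countWrongPlacedBalls_alt
  rw [PySem.Str.len_eq]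
  have : (fun (count i : Int) =>
      if PySem.Int.mod (i + 1) 2 = 0 ∧ PySem.Str.pyGet? s i = some 'R' then count + 1
      else if PySem.Int.mod (i + 1) 2 = 1 ∧ PySem.Str.pyGet? s i = some 'B' then count + 1
      else count) = pvAFun s.toList := by
    funext count i
    rfl
  rw [this]
  exact pvMain s.toList 0
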